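-- pv_equiv track=rewrite | github.com/LucasBN/Bioinformatics | DNAToolKit.py | locateMotif
-- ===== SOURCE A (Python) =====
-- def locateMotif(sequence, motif):
--     results = []
--     for i in range(0, len(sequence) - len(motif) + 1, 1):
--         tmpStr = ""
--         for j in range(len(motif)):
--             tmpStr += sequence[i+j]
--         if tmpStr == motif: results.append(i+1)
--     return results
-- ===== SOURCE B (Python) =====
-- def locateMotif(sequence, motif):
--     results = []
--     pos = sequence.find(motif)
--     while pos != -1:
--         results.append(pos + 1)
--         pos = sequence.find(motif, pos + 1)
--     return results
-- ===== Notes on version B (the rewrite author's own statement) =====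
-- stated objective: faster
-- what changed: replaces the index loop that rebuilds each window character-by-character with a repeated str.find scan that jumps from one match to the next
import Mathlib
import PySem

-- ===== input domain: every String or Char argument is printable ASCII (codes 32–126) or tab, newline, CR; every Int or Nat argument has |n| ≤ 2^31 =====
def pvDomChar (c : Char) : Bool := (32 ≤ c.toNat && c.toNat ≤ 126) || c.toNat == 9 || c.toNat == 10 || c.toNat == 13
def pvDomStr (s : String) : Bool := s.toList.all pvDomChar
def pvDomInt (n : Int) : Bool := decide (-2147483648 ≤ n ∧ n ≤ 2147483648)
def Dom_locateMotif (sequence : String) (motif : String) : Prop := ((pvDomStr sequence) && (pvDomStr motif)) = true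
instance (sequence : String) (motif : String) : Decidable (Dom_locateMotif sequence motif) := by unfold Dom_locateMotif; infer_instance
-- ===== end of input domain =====

-- B replaces A's window-rebuilding index loop by a repeated str.find scan (objective: faster by a large constant factor).

-- ===== PORT A =====
-- A's two nested loops, over the characters of the two strings
def locateMotifCore (s m : List Char) : List Int :=
  (PySem.List.pyRange 0 ((s.length : Int) - (m.length : Int) + 1)).foldl
    (fun results i =>
      -- sequence[i+j]: the index i+j is always in range inside A's loops, so the pyGetD default is never used
      let tmpStr := (PySem.List.pyRange 0 ((m.length : Int))).foldl
        (fun t j => t ++ [PySem.List.pyGetD s (i + j) ' ']) []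
      if tmpStr = m then results ++ [i + 1] else results) []

def locateMotif (sequence : String) (motif : String) : List Int :=
  locateMotifCore sequence.toList motif.toList

-- ===== PORT B =====
-- the while loop of Source B; fuel s.length + 2 bounds the iteration count (each find strictly increases pos)
def findLoop (s : List Char) (m : List Char) : Nat → Int → List Int → List Int
  | 0, _, acc => acc
  | fuel + 1, pos, acc =>
    if pos = -1 then acc
    else findLoop s m fuel (PySem.Chars.findFrom s m (pos + 1)) (acc ++ [pos + 1])

def locateMotif_alt (sequence : String) (motif : String) : List Int :=
  let s := sequence.toList
  let m := motif.toList
  findLoop s m (s.length + 2) (PySem.Chars.find s m) []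

-- ===== PRECONDITION & SPEC =====
def Spec_locateMotif (sequence : String) (motif : String) (out : List Int) : Prop := out = locateMotif_alt sequence motif
instance (sequence : String) (motif : String) (out : List Int) : Decidable (Spec_locateMotif sequence motif out) := by unfold Spec_locateMotif; infer_instance

-- ===== CLAIM (what is proved, stated in full; the proofs are below) =====
def Claim_equal_locateMotif : Prop := ∀ (sequence : String) (motif : String), Dom_locateMotif sequence motif → Spec_locateMotif sequence motif (locateMotif sequence motif)

-- ===== LEMMAS AND PROOFS =====

-- the common characterisation: the (0-based) positions where motif occurs
def matchPos (s m : List Char) : List Nat :=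
  (List.range (s.length + 1 - m.length)).filter (fun j => decide (m <+: s.drop j))

lemma mem_matchPos {s m : List Char} {j : Nat} :
    j ∈ matchPos s m ↔ j ≤ s.length ∧ m <+: s.drop j := by
  simp only [matchPos, List.mem_filter, List.mem_range, decide_eq_true_eq]
  constructor
  · rintro ⟨h1, h2⟩; exact ⟨by omega, h2⟩
  · rintro ⟨h1, h2⟩
    have := h2.length_le
    simp only [List.length_drop] at this
    exact ⟨by omega, h2⟩

lemma matchPos_le {s m : List Char} {j : Nat} (hj : j ∈ matchPos s m) : j ≤ s.length :=
  (mem_matchPos.mp hj).1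

lemma matchPos_sorted (s m : List Char) : (matchPos s m).Pairwise (· < ·) :=
  (List.pairwise_lt_range).filter _

lemma foldl_append_ite (P : Int → Prop) [DecidablePred P] (f : Int → Int) (l : List Int) (acc : List Int) :
    l.foldl (fun acc x => if P x then acc ++ [f x] else acc) acc
      = acc ++ (l.filter (fun x => decide (P x))).map f := by
  induction l generalizing acc with
  | nil => simp
  | cons a t ih =>
    simp only [List.foldl_cons, List.filter_cons]
    by_cases h : P a
    · simp [h, ih]
    · simp [h, ih]

lemma tmp_eq (s : List Char) (mlen k : Nat) (h : k + mlen ≤ s.length) :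
    (PySem.List.pyRange 0 (mlen : Int)).map (fun j => PySem.List.pyGetD s ((k : Int) + j) ' ')
      = (s.drop k).take mlen := by
  apply List.ext_getElem
  · simp [PySem.List.pyRange_one]; omega
  · intro t h1 h2
    simp only [PySem.List.pyRange_one, List.map_map, List.getElem_map, List.getElem_range,
      Function.comp, zero_add]
    have hc : (k : Int) + (t : Int) = ((k + t : Nat) : Int) := by push_cast; ring
    rw [hc, PySem.List.pyGetD_natCast]
    have ht : t < mlen := by
      simpa [PySem.List.pyRange_one] using h1
    rw [List.getD_eq_getElem _ _ (by simpa using by omega : k + t < s.length)]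
    simp [List.getElem_take, List.getElem_drop]

lemma A_eq_core (s m : List Char) :
    locateMotifCore s m = (matchPos s m).map (fun j : Nat => ((j : Int) + 1)) := by
  unfold locateMotifCore
  simp only [PySem.List.foldl_append_singleton_eq_map, List.nil_append]
  rw [foldl_append_ite (fun i => (PySem.List.pyRange 0 ((m.length : Int))).map
        (fun j => PySem.List.pyGetD s (i + j) ' ') = m) (fun i => i + 1)]
  rw [List.nil_append]
  conv_lhs => rw [PySem.List.pyRange_one 0 ((s.length : Int) - (m.length : Int) + 1)]
  rw [List.filter_map]
  have hq : (((s.length : Int) - (m.length : Int) + 1) - 0).toNat = s.length + 1 - m.length := by omega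
  rw [hq]
  have hcong : ∀ k ∈ List.range (s.length + 1 - m.length),
      ((fun i => decide ((PySem.List.pyRange 0 ((m.length : Int))).map
        (fun j => PySem.List.pyGetD s (i + j) ' ') = m)) ∘ (fun k : Nat => (0 : Int) + k)) k
      = decide (m <+: s.drop k) := by
    intro k hk
    rw [List.mem_range] at hk
    have hkm : k + m.length ≤ s.length := by omega
    simp only [Function.comp, zero_add]
    rw [tmp_eq s m.length k hkm]
    have hiff : (s.drop k).take m.length = m ↔ m <+: s.drop k := by
      rw [List.prefix_iff_eq_take]
      constructor <;> (intro h; exact h.symm)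
    simp [hiff]
  rw [List.filter_congr hcong]
  unfold matchPos
  rw [List.map_map]
  apply List.map_congr_left
  intro j _
  simp

lemma findFrom_past (s m : List Char) (k : Nat) (h : s.length < k) :
    PySem.Chars.findFrom s m (k : Int) = -1 := by
  simp only [PySem.Chars.findFrom]
  split_ifs <;> omega

lemma prefix_drop_infix {s m : List Char} {k j : Nat} (hkj : k ≤ j) (h : m <+: s.drop j) :
    m <:+: s.drop k := by
  have hd : s.drop j = (s.drop k).drop (j - k) := by
    rw [List.drop_drop]; congr 1; omega
  rw [hd] at h
  exact h.isInfix.trans (List.drop_suffix _ _).isInfix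

lemma filter_le_cons_of_min {l : List Nat} {k p : Nat} (hsort : l.Pairwise (· < ·)) (hp : p ∈ l)
    (hk : k ≤ p) (hmin : ∀ j ∈ l, k ≤ j → p ≤ j) :
    l.filter (fun j => decide (k ≤ j)) = p :: l.filter (fun j => decide (p + 1 ≤ j)) := by
  induction l with
  | nil => cases hp
  | cons a t ih =>
    rw [List.pairwise_cons] at hsort
    rcases List.mem_cons.mp hp with h | h
    · subst h
      rw [List.filter_cons, if_pos (by simpa using hk), List.filter_cons,
        if_neg (by simp)]
      congr 1
      apply List.filter_congr
      intro j hj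
      have := hsort.1 j hj
      simp only [decide_eq_decide]
      omega
    · have hap : a < p := hsort.1 p h
      have hka : ¬ k ≤ a := by
        intro hka
        exact absurd (hmin a (List.mem_cons_self) hka) (by omega)
      rw [List.filter_cons, if_neg (by simpa using hka), List.filter_cons,
        if_neg (by simp; omega)]
      exact ih hsort.2 h (fun j hj hkj => hmin j (List.mem_cons_of_mem a hj) hkj)

lemma loop_spec (s m : List Char) :
    ∀ (fuel k : Nat) (acc : List Int), k ≤ s.length + 1 → s.length + 1 - k ≤ fuel →
      findLoop s m fuel (PySem.Chars.findFrom s m (k : Int)) acc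
        = acc ++ ((matchPos s m).filter (fun j => decide (k ≤ j))).map (fun j : Nat => ((j : Int) + 1)) := by
  intro fuel
  induction fuel with
  | zero =>
    intro k acc hk hf
    have hnil : (matchPos s m).filter (fun j => decide (k ≤ j)) = [] := by
      rw [List.filter_eq_nil_iff]
      intro j hj
      have := matchPos_le hj
      simp only [decide_eq_true_eq]; omega
    rw [hnil]
    simp [findLoop]
  | succ fuel ih =>
    intro k acc hk hf
    by_cases hk1 : k = s.length + 1
    · subst hk1
      rw [findFrom_past s m _ (by omega)]
      have hnil : (matchPos s m).filter (fun j => decide (s.length + 1 ≤ j)) = [] := by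
        rw [List.filter_eq_nil_iff]
        intro j hj
        have := matchPos_le hj
        simp only [decide_eq_true_eq]; omega
      rw [hnil]
      simp [findLoop]
    · have hkle : k ≤ s.length := by omega
      by_cases hneg : PySem.Chars.findFrom s m (k : Int) = -1
      · have hnoinf : ¬ m <:+: s.drop k :=
          (PySem.Chars.findFrom_natCast_eq_neg_one_iff s m k hkle).mp hneg
        have hnil : (matchPos s m).filter (fun j => decide (k ≤ j)) = [] := by
          rw [List.filter_eq_nil_iff]
          intro j hj
          obtain ⟨hj1, hj2⟩ := mem_matchPos.mp hj
          simp only [decide_eq_true_eq]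
          intro hkj
          exact hnoinf (prefix_drop_infix hkj hj2)
        rw [hneg, hnil]
        simp [findLoop]
      · obtain ⟨hge, hpref, hmin⟩ := PySem.Chars.findFrom_natCast_spec s m k hkle hneg
        set pos := PySem.Chars.findFrom s m (k : Int) with hpos
        have hpos0 : 0 ≤ pos := le_trans (by exact_mod_cast Int.natCast_nonneg k) hge
        set p := pos.toNat with hp
        have hposp : pos = (p : Int) := by omega
        have hple : p ≤ s.length := by
          by_contra hgt
          rw [not_le] at hgt
          have hmnil : m = [] := by
            have hdn : s.drop p = [] := by
              rw [List.drop_eq_nil_iff]; omega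
            rw [hdn] at hpref
            exact List.prefix_nil.mp hpref
          have hnp := hmin k (le_refl k) (by omega)
          rw [hmnil] at hnp
          exact hnp (List.nil_prefix)
        have hkp : k ≤ p := by omega
        have hpmem : p ∈ matchPos s m := mem_matchPos.mpr ⟨hple, hpref⟩
        have hfilter : (matchPos s m).filter (fun j => decide (k ≤ j))
            = p :: (matchPos s m).filter (fun j => decide (p + 1 ≤ j)) := by
          apply filter_le_cons_of_min (matchPos_sorted s m) hpmem hkp
          intro j hj hkj
          by_contra hlt
          rw [not_le] at hlt
          exact hmin j hkj hlt (mem_matchPos.mp hj).2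
        have hstep : findLoop s m (fuel + 1) pos acc
            = findLoop s m fuel (PySem.Chars.findFrom s m (pos + 1)) (acc ++ [pos + 1]) := by
          rw [findLoop, if_neg hneg]
        rw [hstep]
        have hcast : pos + 1 = ((p + 1 : Nat) : Int) := by omega
        rw [hcast, ih (p + 1) (acc ++ [((p + 1 : Nat) : Int)]) (by omega) (by omega), hfilter]
        simp

lemma B_eq (sequence motif : String) :
    locateMotif_alt sequence motif
      = (matchPos sequence.toList motif.toList).map (fun j : Nat => ((j : Int) + 1)) := by
  show findLoop sequence.toList motif.toList (sequence.toList.length + 2)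
      (PySem.Chars.find sequence.toList motif.toList) []
    = (matchPos sequence.toList motif.toList).map (fun j : Nat => ((j : Int) + 1))
  have h0 : PySem.Chars.find sequence.toList motif.toList
      = PySem.Chars.findFrom sequence.toList motif.toList ((0 : Nat) : Int) := by
    rw [Nat.cast_zero, PySem.Chars.findFrom_zero]
  rw [h0, loop_spec _ _ (sequence.toList.length + 2) 0 [] (by omega) (by omega)]
  simp

-- ===== VERDICT (by name: the statement is the Claim_ definition above) =====
theorem locateMotif_spec : Claim_equal_locateMotif := by
  intro sequence motif _
  unfold Spec_locateMotif locateMotif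
  rw [A_eq_core, B_eq]
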